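-- pv_equiv track=rewrite | github.com/ehdgnsdl/sparta_algorithm | week_5/pratice/01_catch.py | catch_me
-- ===== SOURCE A (Python) =====
-- from collections import deque
--
-- def catch_me(cony_loc, brown_loc):
--     time = 0
--     queue = deque()
--     queue.append((brown_loc, 0))
--     visited = [{} for _ in range(200001)]
--     while cony_loc <= 200000:
--         cony_loc += time
--         if time in visited[cony_loc]:
--             return time
--
--         for i in range(0, len(queue)):
--             current_position, current_time = queue.popleft()
--             new_time = current_time + 1
--
--             new_position = current_position - 1
--             if 0<=new_position <= 200000:
--                 visited[new_position][new_time] = True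
--                 queue.append((new_position, new_time))
--
--             new_position = current_position + 1
--             if 0 <= new_position <= 200000:
--                 visited[new_position][new_time] = True
--                 queue.append((new_position, new_time))
--
--             new_position = current_position * 2
--             if 0 <= new_position <= 200000:
--                 visited[new_position][new_time] = True
--                 queue.append((new_position, new_time))
--
--         time += 1
--
--     return -1
-- ===== SOURCE B (Python) =====
-- def catch_me(cony_loc, brown_loc):
--     frontier = {brown_loc}
--     time = 0
--     pos = cony_loc
--     while True:
--         if pos > 200000:
--             return -1
--         if time >= 1 and pos in frontier:
--             return time
--         nxt = set()
--         for p in frontier: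
--             for np in (p - 1, p + 1, p * 2):
--                 if 0 <= np <= 200000:
--                     nxt.add(np)
--         frontier = nxt
--         time += 1
--         pos += time
-- ===== Notes on version B (the rewrite author's own statement) =====
-- stated objective: faster
-- what changed: A re-expands every duplicated (position, time) queue entry (the queue triples each second, ~3^t states) and keeps a per-position dict of times; B keeps one deduplicated frontier set of positions per second, advancing it and cony's position in lockstep, so each second costs at most 200001 set operations.
-- outside the precondition, e.g. on catch_me(-49, 200000): A returns 9, B returns -1; on catch_me(-5, 3): A returns 4, B returns 4
import Mathlib
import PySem

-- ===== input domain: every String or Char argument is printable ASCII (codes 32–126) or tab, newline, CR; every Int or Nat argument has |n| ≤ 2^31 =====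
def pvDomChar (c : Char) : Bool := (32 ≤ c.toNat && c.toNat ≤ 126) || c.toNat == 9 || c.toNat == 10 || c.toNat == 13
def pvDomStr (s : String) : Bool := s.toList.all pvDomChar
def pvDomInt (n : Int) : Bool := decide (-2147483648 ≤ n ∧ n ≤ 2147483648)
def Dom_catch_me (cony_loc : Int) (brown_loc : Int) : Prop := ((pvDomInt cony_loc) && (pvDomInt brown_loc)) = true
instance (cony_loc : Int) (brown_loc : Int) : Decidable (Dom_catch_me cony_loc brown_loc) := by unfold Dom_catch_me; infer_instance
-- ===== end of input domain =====

-- B replaces A's duplicate-expanding (position, time) queue by one deduplicated frontier set per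
-- second (exponential 3^t states become at most 200001 per level); equal return value proved on Pre_.

-- ===== PORT A =====
-- Python's `visited` (a list of 200001 dicts keyed by time, used only for key-membership tests) is
-- modeled as one hash map keyed by (position, time); `time in visited[cony_loc]` = contains (cony, time).
-- The list-index bound check is explicit: Python raises IndexError for an index above 200000 or below
-- -200001 (and wraps around for -200001..-1); both escapes are modeled as `none` and lie outside Pre_.
def pvPushA (np : Int) (nt : Nat) (s : Std.HashMap (Int × Nat) Bool × List (Int × Nat)) :
    Std.HashMap (Int × Nat) Bool × List (Int × Nat) :=
  if 0 ≤ np ∧ np ≤ 200000 then (s.1.insert (np, nt) true, (np, nt) :: s.2) else s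

-- one pass of the inner `for i in range(0, len(queue))` body for a dequeued (position, time) pair
def pvStepA (s : Std.HashMap (Int × Nat) Bool × List (Int × Nat)) (pr : Int × Nat) :
    Std.HashMap (Int × Nat) Bool × List (Int × Nat) :=
  pvPushA (pr.1 * 2) (pr.2 + 1) (pvPushA (pr.1 + 1) (pr.2 + 1) (pvPushA (pr.1 - 1) (pr.2 + 1) s))

-- the `while cony_loc <= 200000` loop; fuel only makes it structurally total (1000 exceeds every
-- iteration count reachable inside Pre_; exhaustion returns none, like the raising escapes).
-- Children are accumulated by cons and reversed, giving exactly the deque order Python builds.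
def pvLoopA (fuel : Nat) (cony : Int) (time : Nat) (queue : List (Int × Nat))
    (visited : Std.HashMap (Int × Nat) Bool) : Option Int :=
  match fuel with
  | 0 => none
  | fuel + 1 =>
    if cony ≤ 200000 then
      let cony' := cony + (time : Int)
      if 0 ≤ cony' ∧ cony' ≤ 200000 then
        if visited.contains (cony', time) then some (time : Int)
        else
          let s := queue.foldl pvStepA (visited, [])
          pvLoopA fuel cony' (time + 1) s.2.reverse s.1
      else none  -- Python: IndexError (or negative-index wraparound); excluded by Pre_
    else some (-1)

def catch_me (cony_loc : Int) (brown_loc : Int) : Int :=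
  (pvLoopA 1000 cony_loc 0 [(brown_loc, 0)] Std.HashMap.emptyWithCapacity).getD 0

-- ===== PORT B =====
-- one second of brown moves: the set of positions reachable in exactly one more step
def pvStepB (frontier : PySem.Set Int) : PySem.Set Int :=
  frontier.foldl
    (fun nxt p =>
      [p - 1, p + 1, p * 2].foldl
        (fun nxt np => if 0 ≤ np ∧ np ≤ 200000 then PySem.Set.add nxt np else nxt) nxt)
    PySem.Set.empty

-- Source B's `while True` loop; the fuel only makes it structurally total (ample inside Pre_)
def pvLoopB (fuel : Nat) (pos : Int) (time : Nat) (frontier : PySem.Set Int) : Int :=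
  match fuel with
  | 0 => 0
  | fuel + 1 =>
    if 200000 < pos then -1
    else if 1 ≤ time ∧ frontier.contains pos = true then (time : Int)
    else pvLoopB fuel (pos + ((time : Int) + 1)) (time + 1) (pvStepB frontier)

def catch_me_alt (cony_loc : Int) (brown_loc : Int) : Int :=
  pvLoopB 1000 cony_loc 0 (PySem.Set.ofList [brown_loc])

-- ===== PRECONDITION & SPEC =====
-- Helpers for Pre_: cony's position after t seconds, and a breadth-first sweep over brown's
-- reachable positions that decides whether brown ever stands on cony's square.
def pvMoves (p : Int) : List Int := [p - 1, p + 1, p * 2]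

-- cony's position after t seconds
def pvPos (c : Int) (t : Nat) : Int := c + ((t * (t + 1) / 2 : Nat) : Int)

-- add np to the new frontier unless off the board or already reached at this parity
def pvAdd (acc : List Int × Std.HashSet Int) (np : Int) : List Int × Std.HashSet Int :=
  if 0 ≤ np ∧ np ≤ 200000 ∧ ¬ np ∈ acc.2 then (np :: acc.1, acc.2.insert np) else acc

-- one second of brown moves: the on-board positions one move from N not yet in cum (cum updated)
def pvGrow (cum : Std.HashSet Int) (N : List Int) : List Int × Std.HashSet Int :=
  N.foldl (fun acc p => (pvMoves p).foldl pvAdd acc) ([], cum)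

-- after t rounds: (new frontier, positions reached at some s ≤ t with s ≡ t (mod 2),
-- positions reached at some s < t of the other parity, catch seen at some second ≤ t).
-- A position reached at second s is reached again at s+2 (step away and back), so the parity
-- cumulative sets decide exact-time reachability; the lemmas below establish exactly that.
def pvSweep (c b : Int) : Nat → List Int × Std.HashSet Int × Std.HashSet Int × Bool
  | 0 => ([b], (∅ : Std.HashSet Int).insert b, ∅, false)
  | t + 1 =>
    let s := pvSweep c b t
    let g := pvGrow s.2.2.1 s.1
    (g.1, g.2, s.2.1,
      s.2.2.2 || (decide (pvPos c (t + 1) ≤ 200000) && g.2.contains (pvPos c (t + 1))))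

-- Pre_ = exactly the inputs where Python A returns a value, except that it also keeps out
-- cony_loc < 0 (there Python's visited[cony_loc] hits negative-index wraparound, so A's value is an
-- accident of the list indexing; the natural B does not reproduce it).  A returns iff cony_loc is
-- already beyond 200000 (value -1) or brown reaches cony's position at some exact second t before
-- cony leaves the board (value t; any catch happens by second 633, which the sweep covers — lemma
-- pvFound_iff below characterises the sweep as ∃ t ≥ 1, pos t ≤ 200000 ∧ pos t ∈ pvLvl b t); on
-- every other input A raises IndexError (uncaught cony stepping past 200000, or cony_loc < -200001).
def Pre_catch_me (cony_loc : Int) (brown_loc : Int) : Prop :=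
  200000 < cony_loc ∨ (0 ≤ cony_loc ∧ (pvSweep cony_loc brown_loc 633).2.2.2 = true)
instance (cony_loc : Int) (brown_loc : Int) : Decidable (Pre_catch_me cony_loc brown_loc) := by
  unfold Pre_catch_me; infer_instance

def pvWitness_catch_me : Int × Int := (200001, 0)

def Spec_catch_me (cony_loc : Int) (brown_loc : Int) (out : Int) : Prop := out = catch_me_alt cony_loc brown_loc
instance (cony_loc : Int) (brown_loc : Int) (out : Int) : Decidable (Spec_catch_me cony_loc brown_loc out) := by unfold Spec_catch_me; infer_instance

-- ===== CLAIM (what is proved, stated in full; the proofs are below) =====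
def Claim_equal_catch_me : Prop := ∀ (cony_loc : Int) (brown_loc : Int), Dom_catch_me cony_loc brown_loc → Pre_catch_me cony_loc brown_loc → Spec_catch_me cony_loc brown_loc (catch_me cony_loc brown_loc)

-- ===== LEMMAS AND PROOFS =====

-- the positions brown can occupy after exactly t seconds (the level sets of the search)
def pvLvl (b : Int) : Nat → List Int
  | 0 => [b]
  | t + 1 =>
    PySem.List.dedup (((pvLvl b t).flatMap pvMoves).filter (fun x => decide (0 ≤ x ∧ x ≤ 200000)))


-- the catch predicate: brown stands on cony's square at second t (t ≥ 1, square still on the board)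
def pvCatch (c b : Int) (t : Nat) : Prop :=
  1 ≤ t ∧ pvPos c t ≤ 200000 ∧ pvPos c t ∈ pvLvl b t

lemma pvTri_mono {t s : Nat} (h : t ≤ s) : t * (t + 1) / 2 ≤ s * (s + 1) / 2 :=
  Nat.div_le_div_right (Nat.mul_le_mul h (by omega))

lemma pvPos_mono (c : Int) {t s : Nat} (h : t ≤ s) : pvPos c t ≤ pvPos c s := by
  unfold pvPos
  have := pvTri_mono h
  omega

lemma pvTri_succ (t : Nat) : (t + 1) * (t + 2) / 2 = t * (t + 1) / 2 + (t + 1) := by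
  have h2 : t * (t + 1) % 2 = 0 := Nat.even_iff.mp (Nat.even_mul_succ_self t)
  have h : (t + 1) * (t + 2) = t * (t + 1) + 2 * (t + 1) := by ring
  omega

lemma pvPos_succ (c : Int) (t : Nat) : pvPos c (t + 1) = pvPos c t + ((t : Int) + 1) := by
  unfold pvPos
  rw [show t + 1 + 1 = t + 2 from rfl, pvTri_succ t]
  push_cast
  ring

-- membership in the next level set
lemma mem_pvLvl_succ {b x : Int} {t : Nat} :
    x ∈ pvLvl b (t + 1) ↔ (0 ≤ x ∧ x ≤ 200000) ∧ ∃ p ∈ pvLvl b t, x ∈ pvMoves p := by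
  simp [pvLvl, List.mem_filter, List.mem_flatMap]
  tauto

-- A-side: the in-range children a dequeued (position, time) pair generates
def pvKids (pr : Int × Nat) : List (Int × Nat) :=
  ((pvMoves pr.1).filter (fun np => decide (0 ≤ np ∧ np ≤ 200000))).map (fun np => (np, pr.2 + 1))

lemma mem_pvKids {k pr : Int × Nat} :
    k ∈ pvKids pr ↔ k.2 = pr.2 + 1 ∧ (0 ≤ k.1 ∧ k.1 ≤ 200000) ∧ k.1 ∈ pvMoves pr.1 := by
  obtain ⟨x, s⟩ := k
  simp [pvKids, List.mem_map, List.mem_filter]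
  tauto

lemma mem_pvKids' (k pr : Int × Nat) :
    k ∈ pvKids pr ↔
      ((k = (pr.1 - 1, pr.2 + 1) ∧ 0 ≤ pr.1 - 1 ∧ pr.1 - 1 ≤ 200000) ∨
       (k = (pr.1 + 1, pr.2 + 1) ∧ 0 ≤ pr.1 + 1 ∧ pr.1 + 1 ≤ 200000) ∨
       (k = (pr.1 * 2, pr.2 + 1) ∧ 0 ≤ pr.1 * 2 ∧ pr.1 * 2 ≤ 200000)) := by
  simp only [pvKids, pvMoves, List.mem_map, List.mem_filter, List.mem_cons, List.not_mem_nil,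
    or_false, decide_eq_true_eq]
  constructor
  · rintro ⟨a, ⟨h | h | h, hr⟩, rfl⟩ <;> subst h <;> tauto
  · rintro (⟨rfl, hr⟩ | ⟨rfl, hr⟩ | ⟨rfl, hr⟩)
    · exact ⟨pr.1 - 1, ⟨Or.inl rfl, hr⟩, rfl⟩
    · exact ⟨pr.1 + 1, ⟨Or.inr (Or.inl rfl), hr⟩, rfl⟩
    · exact ⟨pr.1 * 2, ⟨Or.inr (Or.inr rfl), hr⟩, rfl⟩

lemma pvPushA_contains (np : Int) (nt : Nat) (s : Std.HashMap (Int × Nat) Bool × List (Int × Nat))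
    (k : Int × Nat) :
    ((pvPushA np nt s).1.contains k = true ↔
      s.1.contains k = true ∨ (k = (np, nt) ∧ 0 ≤ np ∧ np ≤ 200000)) := by
  unfold pvPushA
  split_ifs with h
  · simp only [Std.HashMap.contains_insert, Bool.or_eq_true, beq_iff_eq]
    constructor
    · rintro (rfl | hc)
      · exact Or.inr ⟨rfl, h⟩
      · exact Or.inl hc
    · rintro (hc | ⟨rfl, _⟩)
      · exact Or.inr hc
      · exact Or.inl rfl
  · tauto

lemma pvPushA_memQ (np : Int) (nt : Nat) (s : Std.HashMap (Int × Nat) Bool × List (Int × Nat))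
    (x : Int × Nat) :
    (x ∈ (pvPushA np nt s).2 ↔ x ∈ s.2 ∨ (x = (np, nt) ∧ 0 ≤ np ∧ np ≤ 200000)) := by
  unfold pvPushA
  split_ifs with h
  · simp only [List.mem_cons]
    tauto
  · tauto

lemma pvStepA_contains (s : Std.HashMap (Int × Nat) Bool × List (Int × Nat)) (pr : Int × Nat)
    (k : Int × Nat) :
    ((pvStepA s pr).1.contains k = true ↔ s.1.contains k = true ∨ k ∈ pvKids pr) ∧
    (∀ x, x ∈ (pvStepA s pr).2 ↔ x ∈ s.2 ∨ x ∈ pvKids pr) := by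
  constructor
  · rw [pvStepA, pvPushA_contains, pvPushA_contains, pvPushA_contains, mem_pvKids']
    tauto
  · intro x
    rw [pvStepA, pvPushA_memQ, pvPushA_memQ, pvPushA_memQ, mem_pvKids']
    tauto

lemma pvFoldA_spec :
    ∀ (Q : List (Int × Nat)) (s : Std.HashMap (Int × Nat) Bool × List (Int × Nat)),
      (∀ k, (Q.foldl pvStepA s).1.contains k = true ↔
          s.1.contains k = true ∨ ∃ pr ∈ Q, k ∈ pvKids pr) ∧
      (∀ x, x ∈ (Q.foldl pvStepA s).2 ↔ x ∈ s.2 ∨ ∃ pr ∈ Q, x ∈ pvKids pr) := by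
  intro Q
  induction Q with
  | nil => simp
  | cons pr Q ih =>
    intro s
    constructor
    · intro k
      rw [List.foldl_cons, (ih (pvStepA s pr)).1 k, (pvStepA_contains s pr k).1]
      simp
      tauto
    · intro x
      rw [List.foldl_cons, (ih (pvStepA s pr)).2 x, (pvStepA_contains s pr x).2]
      simp
      tauto

-- B-side: membership in pvStepB
lemma pvAddIf_mem (nxt : PySem.Set Int) (np x : Int) :
    x ∈ (if 0 ≤ np ∧ np ≤ 200000 then PySem.Set.add nxt np else nxt) ↔
      x ∈ nxt ∨ (x = np ∧ 0 ≤ np ∧ np ≤ 200000) := by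
  split_ifs with h
  · rw [PySem.Set.mem_add]
    tauto
  · tauto

lemma pvStepB_inner_mem (p : Int) (nxt : PySem.Set Int) (x : Int) :
    x ∈ [p - 1, p + 1, p * 2].foldl
        (fun nxt np => if 0 ≤ np ∧ np ≤ 200000 then PySem.Set.add nxt np else nxt) nxt ↔
      x ∈ nxt ∨ ((0 ≤ x ∧ x ≤ 200000) ∧ x ∈ pvMoves p) := by
  simp only [List.foldl_cons, List.foldl_nil]
  rw [pvAddIf_mem, pvAddIf_mem, pvAddIf_mem]
  simp only [pvMoves, List.mem_cons, List.not_mem_nil, or_false]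
  constructor
  · rintro (((h | ⟨rfl, hr⟩) | ⟨rfl, hr⟩) | ⟨rfl, hr⟩) <;> tauto
  · rintro (h | ⟨hr, (rfl | rfl | rfl)⟩) <;> tauto

lemma pvStepB_mem :
    ∀ (F nxt : PySem.Set Int) (x : Int),
      x ∈ F.foldl
          (fun nxt p =>
            [p - 1, p + 1, p * 2].foldl
              (fun nxt np => if 0 ≤ np ∧ np ≤ 200000 then PySem.Set.add nxt np else nxt) nxt)
          nxt ↔
        x ∈ nxt ∨ ∃ p ∈ F, (0 ≤ x ∧ x ≤ 200000) ∧ x ∈ pvMoves p := by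
  intro F
  induction F with
  | nil => simp
  | cons p F ih =>
    intro nxt x
    rw [List.foldl_cons, ih, pvStepB_inner_mem]
    simp
    tauto

lemma pvStepB_eq_lvl {b : Int} {t : Nat} {F : PySem.Set Int}
    (hF : ∀ x, x ∈ F ↔ x ∈ pvLvl b t) :
    ∀ x, x ∈ pvStepB F ↔ x ∈ pvLvl b (t + 1) := by
  intro x
  rw [pvStepB, pvStepB_mem, mem_pvLvl_succ]
  simp only [PySem.Set.empty]
  constructor
  · rintro (h | ⟨p, hp, hr, hm⟩)
    · simp at h
    · exact ⟨hr, p, (hF p).mp hp, hm⟩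
  · rintro ⟨hr, p, hp, hm⟩
    exact Or.inr ⟨p, (hF p).mpr hp, hr, hm⟩

-- one-step unfoldings of the two loops
lemma pvLoopA_succ (fuel : Nat) (cony : Int) (time : Nat) (queue : List (Int × Nat))
    (visited : Std.HashMap (Int × Nat) Bool) :
    pvLoopA (fuel + 1) cony time queue visited =
      if cony ≤ 200000 then
        if 0 ≤ cony + (time : Int) ∧ cony + (time : Int) ≤ 200000 then
          if visited.contains (cony + (time : Int), time) then some (time : Int)
          else
            pvLoopA fuel (cony + (time : Int)) (time + 1)
              (queue.foldl pvStepA (visited, [])).2.reverse (queue.foldl pvStepA (visited, [])).1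
        else none
      else some (-1) := rfl

lemma pvLoopB_succ (fuel : Nat) (pos : Int) (time : Nat) (frontier : PySem.Set Int) :
    pvLoopB (fuel + 1) pos time frontier =
      if 200000 < pos then -1
      else if 1 ≤ time ∧ frontier.contains pos = true then (time : Int)
      else pvLoopB fuel (pos + ((time : Int) + 1)) (time + 1) (pvStepB frontier) := rfl

-- A's loop returns the first catch time T
lemma pvLoopA_eq (c b : Int) (hc : 0 ≤ c) (T : Nat) (hT : pvCatch c b T)
    (hmin : ∀ s, s < T → ¬ pvCatch c b s) :
    ∀ fuel t (Q : List (Int × Nat)) (V : Std.HashMap (Int × Nat) Bool),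
      t ≤ T → T < t + fuel →
      (∀ p s, (p, s) ∈ Q ↔ s = t ∧ p ∈ pvLvl b t) →
      (∀ p s, V.contains (p, s) = true ↔ 1 ≤ s ∧ s ≤ t ∧ p ∈ pvLvl b s) →
      pvLoopA fuel (pvPos c t - (t : Int)) t Q V = some (T : Int) := by
  intro fuel
  induction fuel with
  | zero => intro t Q V h1 h2 _ _; omega
  | succ fuel ih =>
    intro t Q V htT hfuel hQ hV
    obtain ⟨hT1, hTpos, hTmem⟩ := hT
    have hmono : pvPos c t ≤ pvPos c T := pvPos_mono c htT
    rw [pvLoopA_succ]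
    have hguard : pvPos c t - (t : Int) ≤ 200000 := by
      have : (0 : Int) ≤ (t : Int) := Int.natCast_nonneg t
      omega
    rw [if_pos hguard]
    have hcony : pvPos c t - (t : Int) + (t : Int) = pvPos c t := by ring
    rw [hcony]
    have hrange : 0 ≤ pvPos c t ∧ pvPos c t ≤ 200000 := by
      constructor
      · unfold pvPos; positivity
      · omega
    rw [if_pos hrange]
    by_cases heq : t = T
    · subst heq
      rw [if_pos ((hV _ _).mpr ⟨hT1, le_refl t, hTmem⟩)]
    · have htlt : t < T := by omega
      have hnot : ¬ V.contains (pvPos c t, t) = true := by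
        intro hcon
        obtain ⟨h1, _, h3⟩ := (hV _ _).mp hcon
        exact hmin t htlt ⟨h1, by omega, h3⟩
      rw [if_neg hnot]
      have hfold := pvFoldA_spec Q (V, [])
      have hQ' : ∀ p s, (p, s) ∈ (Q.foldl pvStepA (V, [])).2.reverse ↔
          s = t + 1 ∧ p ∈ pvLvl b (t + 1) := by
        intro p s
        rw [List.mem_reverse, (hfold.2 (p, s))]
        simp only [List.not_mem_nil, false_or]
        constructor
        · rintro ⟨⟨q, u⟩, hpr, hk⟩
          rw [mem_pvKids] at hk
          obtain ⟨hu, hq⟩ := (hQ q u).mp hpr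
          refine ⟨by simp at hk; omega, ?_⟩
          rw [mem_pvLvl_succ]
          exact ⟨hk.2.1, q, hq, hk.2.2⟩
        · rintro ⟨hs, hp⟩
          rw [mem_pvLvl_succ] at hp
          obtain ⟨hr, q, hq, hm⟩ := hp
          exact ⟨(q, t), (hQ q t).mpr ⟨rfl, hq⟩, mem_pvKids.mpr ⟨by simpa using hs, hr, hm⟩⟩
      have hV' : ∀ p s, ((Q.foldl pvStepA (V, [])).1.contains (p, s) = true) ↔
          1 ≤ s ∧ s ≤ t + 1 ∧ p ∈ pvLvl b s := by
        intro p s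
        rw [hfold.1 (p, s)]
        constructor
        · rintro (h | ⟨⟨q, u⟩, hpr, hk⟩)
          · obtain ⟨h1, h2, h3⟩ := (hV p s).mp h
            exact ⟨h1, by omega, h3⟩
          · rw [mem_pvKids] at hk
            obtain ⟨hu, hq⟩ := (hQ q u).mp hpr
            simp at hk
            refine ⟨by omega, by omega, ?_⟩
            have : s = t + 1 := by omega
            subst this
            rw [mem_pvLvl_succ]
            exact ⟨hk.2.1, q, hq, hk.2.2⟩
        · rintro ⟨h1, h2, h3⟩
          by_cases hst : s ≤ t
          · exact Or.inl ((hV p s).mpr ⟨h1, hst, h3⟩)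
          · have : s = t + 1 := by omega
            subst this
            rw [mem_pvLvl_succ] at h3
            obtain ⟨hr, q, hq, hm⟩ := h3
            exact Or.inr ⟨(q, t), (hQ q t).mpr ⟨rfl, hq⟩, mem_pvKids.mpr ⟨by simp, hr, hm⟩⟩
      have harg : pvPos c t = pvPos c (t + 1) - ((t : Int) + 1) := by
        rw [pvPos_succ]; ring
      rw [harg]
      have := ih (t + 1) _ _ (by omega) (by omega) hQ' hV'
      simpa using this

-- B's loop returns the first catch time T
lemma pvLoopB_eq (c b : Int) (T : Nat) (hT : pvCatch c b T)
    (hmin : ∀ s, s < T → ¬ pvCatch c b s) :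
    ∀ fuel t (F : PySem.Set Int),
      t ≤ T → T < t + fuel →
      (∀ x, x ∈ F ↔ x ∈ pvLvl b t) →
      pvLoopB fuel (pvPos c t) t F = (T : Int) := by
  intro fuel
  induction fuel with
  | zero => intro t F h1 h2 _; omega
  | succ fuel ih =>
    intro t F htT hfuel hF
    obtain ⟨hT1, hTpos, hTmem⟩ := hT
    have hmono : pvPos c t ≤ pvPos c T := pvPos_mono c htT
    rw [pvLoopB_succ, if_neg (by omega)]
    by_cases heq : t = T
    · subst heq
      rw [if_pos ⟨hT1, by rw [PySem.Set.contains_iff]; exact (hF _).mpr hTmem⟩]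
    · have htlt : t < T := by omega
      have hnot : ¬ (1 ≤ t ∧ F.contains (pvPos c t) = true) := by
        rintro ⟨h1, h2⟩
        rw [PySem.Set.contains_iff] at h2
        exact hmin t htlt ⟨h1, by omega, (hF _).mp h2⟩
      rw [if_neg hnot, ← pvPos_succ]
      exact ih (t + 1) _ (by omega) (by omega) (pvStepB_eq_lvl hF)

lemma pvCatch_bound {c b : Int} {t : Nat} (hc : 0 ≤ c) (h : pvCatch c b t) : t ≤ 632 := by
  obtain ⟨_, hpos, _⟩ := h
  by_contra hgt
  have h633 : 633 ≤ t := by omega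
  have hm : 633 * 634 / 2 ≤ t * (t + 1) / 2 := pvTri_mono h633
  unfold pvPos at hpos
  have : ((633 * 634 / 2 : Nat) : Int) ≤ ((t * (t + 1) / 2 : Nat) : Int) := by exact_mod_cast hm
  norm_num at this
  omega


-- ---- correctness of the Pre_ sweep ----
lemma pvAdd_fst (acc : List Int × Std.HashSet Int) (np x : Int) :
    x ∈ (pvAdd acc np).1 ↔
      x ∈ acc.1 ∨ (x = np ∧ (0 ≤ np ∧ np ≤ 200000) ∧ ¬ np ∈ acc.2) := by
  unfold pvAdd
  split_ifs with h
  · simp only [List.mem_cons]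
    tauto
  · tauto

lemma pvAdd_snd (acc : List Int × Std.HashSet Int) (np x : Int) :
    x ∈ (pvAdd acc np).2 ↔ x ∈ acc.2 ∨ (x = np ∧ (0 ≤ np ∧ np ≤ 200000)) := by
  unfold pvAdd
  split_ifs with h
  · rw [Std.HashSet.mem_insert]
    simp only [beq_iff_eq]
    tauto
  · constructor
    · exact Or.inl
    · rintro (hx | ⟨rfl, hr⟩)
      · exact hx
      · tauto

lemma pvGrow3_snd (acc : List Int × Std.HashSet Int) (p x : Int) :
    x ∈ ((pvMoves p).foldl pvAdd acc).2 ↔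
      x ∈ acc.2 ∨ ((0 ≤ x ∧ x ≤ 200000) ∧ x ∈ pvMoves p) := by
  simp only [pvMoves, List.foldl_cons, List.foldl_nil]
  rw [pvAdd_snd, pvAdd_snd, pvAdd_snd]
  simp only [List.mem_cons, List.not_mem_nil, or_false]
  constructor
  · rintro (((h | ⟨rfl, hr⟩) | ⟨rfl, hr⟩) | ⟨rfl, hr⟩) <;> tauto
  · rintro (h | ⟨hr, (rfl | rfl | rfl)⟩) <;> tauto

lemma pvGrow3_fst (acc : List Int × Std.HashSet Int) (p x : Int) :
    x ∈ ((pvMoves p).foldl pvAdd acc).1 ↔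
      x ∈ acc.1 ∨ (¬ x ∈ acc.2 ∧ (0 ≤ x ∧ x ≤ 200000) ∧ x ∈ pvMoves p) := by
  simp only [pvMoves, List.foldl_cons, List.foldl_nil]
  rw [pvAdd_fst, pvAdd_fst, pvAdd_fst, pvAdd_snd, pvAdd_snd, pvAdd_snd]
  simp only [List.mem_cons, List.not_mem_nil, or_false]
  constructor
  · rintro (((h | ⟨rfl, hr, hn⟩) | ⟨rfl, hr, hn⟩) | ⟨rfl, hr, hn⟩)
    · tauto
    · exact Or.inr ⟨hn, hr, Or.inl rfl⟩
    · refine Or.inr ⟨fun hx => hn (Or.inl hx), hr, Or.inr (Or.inl rfl)⟩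
    · refine Or.inr ⟨fun hx => hn (Or.inl (Or.inl hx)), hr, Or.inr (Or.inr rfl)⟩
  · rintro (h | ⟨hn, hr, hm⟩)
    · tauto
    · by_cases h1 : x = p - 1
      · subst h1
        exact Or.inl (Or.inl (Or.inr ⟨rfl, hr, hn⟩))
      · by_cases h2 : x = p + 1
        · subst h2
          refine Or.inl (Or.inr ⟨rfl, hr, ?_⟩)
          rintro (hx | ⟨he, _⟩)
          · exact hn hx
          · omega
        · have h3 : x = p * 2 := by
            rcases hm with hm | hm | hm <;> tauto
          subst h3
          refine Or.inr ⟨rfl, hr, ?_⟩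
          rintro ((hx | ⟨he, _⟩) | ⟨he, _⟩)
          · exact hn hx
          · exact h1 he
          · exact h2 he

lemma pvGrowFold_snd :
    ∀ (N : List Int) (acc : List Int × Std.HashSet Int) (x : Int),
      x ∈ (N.foldl (fun acc p => (pvMoves p).foldl pvAdd acc) acc).2 ↔
        x ∈ acc.2 ∨ ((0 ≤ x ∧ x ≤ 200000) ∧ ∃ p ∈ N, x ∈ pvMoves p) := by
  intro N
  induction N with
  | nil => simp
  | cons p N ih =>
    intro acc x
    rw [List.foldl_cons, ih, pvGrow3_snd]
    simp only [List.mem_cons]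
    constructor
    · rintro ((h | ⟨hr, hm⟩) | ⟨hr, q, hq, hm⟩)
      · tauto
      · exact Or.inr ⟨hr, p, Or.inl rfl, hm⟩
      · exact Or.inr ⟨hr, q, Or.inr hq, hm⟩
    · rintro (h | ⟨hr, q, (rfl | hq), hm⟩)
      · tauto
      · exact Or.inl (Or.inr ⟨hr, hm⟩)
      · exact Or.inr ⟨hr, q, hq, hm⟩

lemma pvGrowFold_fst :
    ∀ (N : List Int) (acc : List Int × Std.HashSet Int) (x : Int),
      x ∈ (N.foldl (fun acc p => (pvMoves p).foldl pvAdd acc) acc).1 ↔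
        x ∈ acc.1 ∨ (¬ x ∈ acc.2 ∧ (0 ≤ x ∧ x ≤ 200000) ∧ ∃ p ∈ N, x ∈ pvMoves p) := by
  intro N
  induction N with
  | nil => simp
  | cons p N ih =>
    intro acc x
    rw [List.foldl_cons, ih, pvGrow3_fst, pvGrow3_snd]
    simp only [List.mem_cons]
    constructor
    · rintro ((h | ⟨hn, hr, hm⟩) | ⟨hn, hr, q, hq, hm⟩)
      · tauto
      · exact Or.inr ⟨hn, hr, p, Or.inl rfl, hm⟩
      · exact Or.inr ⟨fun hx => hn (Or.inl hx), hr, q, Or.inr hq, hm⟩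
    · rintro (h | ⟨hn, hr, q, (rfl | hq), hm⟩)
      · tauto
      · exact Or.inl (Or.inr ⟨hn, hr, hm⟩)
      · by_cases hp : (0 ≤ x ∧ x ≤ 200000) ∧ x ∈ pvMoves p
        · exact Or.inl (Or.inr ⟨hn, hp.1, hp.2⟩)
        · exact Or.inr ⟨fun hx => (by tauto : False), hr, q, hq, hm⟩

lemma pvGrow_fst (cum : Std.HashSet Int) (N : List Int) (x : Int) :
    x ∈ (pvGrow cum N).1 ↔
      ¬ x ∈ cum ∧ (0 ≤ x ∧ x ≤ 200000) ∧ ∃ p ∈ N, x ∈ pvMoves p := by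
  unfold pvGrow
  rw [pvGrowFold_fst]
  simp

lemma pvGrow_snd (cum : Std.HashSet Int) (N : List Int) (x : Int) :
    x ∈ (pvGrow cum N).2 ↔ x ∈ cum ∨ ((0 ≤ x ∧ x ≤ 200000) ∧ ∃ p ∈ N, x ∈ pvMoves p) := by
  unfold pvGrow
  rw [pvGrowFold_snd]

lemma pvSweep_spec (c b : Int) :
    ∀ t : Nat,
      (∀ x, x ∈ (pvSweep c b t).1 ↔
        (x ∈ pvLvl b t ∧ ¬ ∃ s, s < t ∧ s % 2 = t % 2 ∧ x ∈ pvLvl b s)) ∧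
      (∀ x, x ∈ (pvSweep c b t).2.1 ↔ ∃ s, s ≤ t ∧ s % 2 = t % 2 ∧ x ∈ pvLvl b s) ∧
      (∀ x, x ∈ (pvSweep c b t).2.2.1 ↔ ∃ s, s + 1 ≤ t ∧ s % 2 ≠ t % 2 ∧ x ∈ pvLvl b s) ∧
      ((pvSweep c b t).2.2.2 = true ↔
        ∃ u, 1 ≤ u ∧ u ≤ t ∧ pvPos c u ≤ 200000 ∧
          ∃ s, s ≤ u ∧ s % 2 = u % 2 ∧ pvPos c u ∈ pvLvl b s) := by
  intro t
  induction t with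
  | zero =>
    refine ⟨?_, ?_, ?_, ?_⟩
    · intro x
      simp [pvSweep, pvLvl]
    · intro x
      rw [show (pvSweep c b 0).2.1 = (∅ : Std.HashSet Int).insert b from rfl,
        Std.HashSet.mem_insert]
      simp only [beq_iff_eq]
      constructor
      · rintro (rfl | h)
        · exact ⟨0, le_refl 0, rfl, by simp [pvLvl]⟩
        · simp at h
      · rintro ⟨s, hs, _, hm⟩
        interval_cases s
        simp [pvLvl] at hm
        exact Or.inl hm.symm
    · intro x
      simp [pvSweep]
    · simp [pvSweep]
  | succ t ih =>
    obtain ⟨ihN, ihS, ihO, ihF⟩ := ih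
    have hN : (pvSweep c b (t + 1)).1 = (pvGrow (pvSweep c b t).2.2.1 (pvSweep c b t).1).1 := rfl
    have hS : (pvSweep c b (t + 1)).2.1 =
        (pvGrow (pvSweep c b t).2.2.1 (pvSweep c b t).1).2 := rfl
    have hO : (pvSweep c b (t + 1)).2.2.1 = (pvSweep c b t).2.1 := rfl
    have hF : (pvSweep c b (t + 1)).2.2.2 =
        ((pvSweep c b t).2.2.2 ||
          (decide (pvPos c (t + 1) ≤ 200000) &&
            (pvGrow (pvSweep c b t).2.2.1 (pvSweep c b t).1).2.contains (pvPos c (t + 1)))) := rfl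
    -- the grown cumulative set is the union of the old opposite-parity cumulative and level t+1
    have hcum : ∀ x, x ∈ (pvGrow (pvSweep c b t).2.2.1 (pvSweep c b t).1).2 ↔
        ∃ s, s ≤ t + 1 ∧ s % 2 = (t + 1) % 2 ∧ x ∈ pvLvl b s := by
      intro x
      rw [pvGrow_snd]
      constructor
      · rintro (h | ⟨hr, p, hp, hm⟩)
        · obtain ⟨s, hs, hpar, hmem⟩ := (ihO x).mp h
          exact ⟨s, by omega, by omega, hmem⟩
        · refine ⟨t + 1, le_refl _, rfl, ?_⟩
          rw [mem_pvLvl_succ]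
          exact ⟨hr, p, ((ihN p).mp hp).1, hm⟩
      · rintro ⟨s, hs, hpar, hmem⟩
        by_cases hst : s ≤ t
        · exact Or.inl ((ihO x).mpr ⟨s, by omega, by omega, hmem⟩)
        · have hst1 : s = t + 1 := by omega
          subst hst1
          rw [mem_pvLvl_succ] at hmem
          obtain ⟨hr, p, hp, hm⟩ := hmem
          by_cases hNp : p ∈ (pvSweep c b t).1
          · exact Or.inr ⟨hr, p, hNp, hm⟩
          · -- p ∈ lvl t was reached at an earlier s' ≡ t, so x ∈ lvl (s'+1) is already in cumO
            rw [ihN p] at hNp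
            push Not at hNp
            obtain ⟨s', hs', hpar', hm'⟩ := hNp hp
            refine Or.inl ((ihO x).mpr ⟨s' + 1, by omega, by omega, ?_⟩)
            rw [mem_pvLvl_succ]
            exact ⟨hr, p, hm', hm⟩
    refine ⟨?_, ?_, ?_, ?_⟩
    · intro x
      rw [hN, pvGrow_fst]
      constructor
      · rintro ⟨hn, hr, p, hp, hm⟩
        refine ⟨by rw [mem_pvLvl_succ]; exact ⟨hr, p, ((ihN p).mp hp).1, hm⟩, ?_⟩
        rintro ⟨s, hs, hpar, hmem⟩
        exact hn ((ihO x).mpr ⟨s, by omega, by omega, hmem⟩)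
      · rintro ⟨hmem, hnone⟩
        have hr : 0 ≤ x ∧ x ≤ 200000 := by
          rw [mem_pvLvl_succ] at hmem
          exact hmem.1
        refine ⟨?_, hr, ?_⟩
        · intro hx
          obtain ⟨s, hs, hpar, hmem'⟩ := (ihO x).mp hx
          exact hnone ⟨s, by omega, by omega, hmem'⟩
        · rw [mem_pvLvl_succ] at hmem
          obtain ⟨_, p, hp, hm⟩ := hmem
          refine ⟨p, ?_, hm⟩
          rw [ihN p]
          refine ⟨hp, ?_⟩
          rintro ⟨s', hs', hpar', hm'⟩
          refine hnone ⟨s' + 1, by omega, by omega, ?_⟩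
          rw [mem_pvLvl_succ]
          exact ⟨hr, p, hm', hm⟩
    · intro x
      rw [hS]
      exact hcum x
    · intro x
      rw [hO, ihS]
      constructor
      · rintro ⟨s, hs, hpar, hm⟩
        exact ⟨s, by omega, by omega, hm⟩
      · rintro ⟨s, hs, hpar, hm⟩
        exact ⟨s, by omega, by omega, hm⟩
    · rw [hF, Bool.or_eq_true, Bool.and_eq_true, decide_eq_true_eq, ihF,
        Std.HashSet.contains_iff_mem]
      constructor
      · rintro (⟨u, h1, h2, h3, hs⟩ | ⟨hle, hmem⟩)
        · exact ⟨u, h1, by omega, h3, hs⟩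
        · obtain ⟨s, hs, hpar, hm⟩ := (hcum _).mp hmem
          exact ⟨t + 1, by omega, le_refl _, hle, s, hs, hpar, hm⟩
      · rintro ⟨u, h1, h2, h3, s, hs, hpar, hm⟩
        by_cases hut : u ≤ t
        · exact Or.inl ⟨u, h1, hut, h3, s, hs, hpar, hm⟩
        · have hut1 : u = t + 1 := by omega
          subst hut1
          exact Or.inr ⟨h3, (hcum _).mpr ⟨s, hs, hpar, hm⟩⟩

lemma pvLvl_step2 {b x : Int} {s : Nat} (hr : 0 ≤ x ∧ x ≤ 200000) (h : x ∈ pvLvl b s) :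
    x ∈ pvLvl b (s + 2) := by
  by_cases h1 : 1 ≤ x
  · have hmid : x - 1 ∈ pvLvl b (s + 1) := by
      rw [mem_pvLvl_succ]
      exact ⟨by omega, x, h, by simp [pvMoves]⟩
    rw [mem_pvLvl_succ]
    exact ⟨hr, x - 1, hmid, by simp [pvMoves]⟩
  · have hx0 : x = 0 := by omega
    subst hx0
    have hmid : (1 : Int) ∈ pvLvl b (s + 1) := by
      rw [mem_pvLvl_succ]
      exact ⟨by omega, 0, h, by simp [pvMoves]⟩
    rw [mem_pvLvl_succ]
    exact ⟨hr, 1, hmid, by simp [pvMoves]⟩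

lemma pvLvl_climb {b x : Int} (hr : 0 ≤ x ∧ x ≤ 200000) :
    ∀ (k s : Nat), x ∈ pvLvl b s → x ∈ pvLvl b (s + 2 * k) := by
  intro k
  induction k with
  | zero => intro s h; simpa using h
  | succ k ih =>
    intro s h
    have h2 := ih (s + 2) (pvLvl_step2 hr h)
    have he : s + 2 + 2 * k = s + 2 * (k + 1) := by omega
    rwa [he] at h2

-- the sweep finds a catch iff one exists (for cony starting at a nonnegative position)
lemma pvFound_iff (c b : Int) (hc : 0 ≤ c) :
    (pvSweep c b 633).2.2.2 = true ↔ ∃ t, pvCatch c b t := by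
  rw [(pvSweep_spec c b 633).2.2.2]
  constructor
  · rintro ⟨u, h1, _, h3, s, hs, hpar, hm⟩
    have hr : 0 ≤ pvPos c u ∧ pvPos c u ≤ 200000 := by
      refine ⟨?_, h3⟩
      unfold pvPos
      positivity
    obtain ⟨k, hk⟩ : ∃ k, u = s + 2 * k := ⟨(u - s) / 2, by omega⟩
    have hm2 : pvPos c u ∈ pvLvl b (s + 2 * k) := pvLvl_climb hr k s hm
    rw [← hk] at hm2
    exact ⟨u, h1, h3, hm2⟩
  · rintro ⟨t, h1, h2, h3⟩
    have hb : t ≤ 632 := pvCatch_bound hc ⟨h1, h2, h3⟩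
    exact ⟨t, h1, by omega, h2, t, le_refl t, rfl, h3⟩

-- ===== VERDICT (by name: the statement is the Claim_ definition above) =====
theorem catch_me_spec : Claim_equal_catch_me := by
  intro c b _hdom hpre
  unfold Spec_catch_me
  by_cases hbig : 200000 < c
  · -- both programs answer -1 immediately
    unfold catch_me catch_me_alt
    rw [show (1000 : Nat) = 999 + 1 from rfl, pvLoopA_succ, pvLoopB_succ,
      if_neg (by omega), if_pos hbig]
    rfl
  · obtain ⟨hc, hex⟩ : 0 ≤ c ∧ ∃ t, pvCatch c b t := by
      rcases hpre with h | ⟨hc, hfound⟩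
      · omega
      · exact ⟨hc, (pvFound_iff c b hc).mp hfound⟩
    classical
    have hT := Nat.find_spec hex
    set T := Nat.find hex with hTdef
    have hmin : ∀ s, s < T → ¬ pvCatch c b s := fun s hs => Nat.find_min hex hs
    have hbound : T ≤ 632 := pvCatch_bound hc hT
    have hA : catch_me c b = (some ((T : Nat) : Int)).getD 0 := by
      unfold catch_me
      congr 1
      have h0 : pvPos c 0 - ((0 : Nat) : Int) = c := by unfold pvPos; simp
      rw [← h0]
      exact pvLoopA_eq c b hc T hT hmin 1000 0 _ _ (by omega) (by omega)
        (by intro p s; simp [pvLvl, and_comm])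
        (by intro p s; simp only [Std.HashMap.contains_emptyWithCapacity]; constructor <;> intro h <;> [cases h; omega])
    have hB : catch_me_alt c b = (T : Int) := by
      unfold catch_me_alt
      have h0 : pvPos c 0 = c := by unfold pvPos; simp
      rw [← h0]
      exact pvLoopB_eq c b T hT hmin 1000 0 _ (by omega) (by omega)
        (by intro x; simp [pvLvl, PySem.Set.mem_ofList])
    rw [hA, hB]
    rfl
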